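-- pv_equiv track=rewrite | github.com/brokenfloppydisk/Ciphers | ciphers/aristocrat.py | patristocrat
-- ===== SOURCE A (Python) =====
-- from string import ascii_lowercase
--
-- def patristocrat(text: str) -> str:
--     """Returns the text formatted as a patristocrat
--     """
--     formatted_text = ""
--
--     # Remove non-ascii characters
--     for character in text:
--         if character.lower() in ascii_lowercase:
--             formatted_text += character
--
--     text = formatted_text
--
--     output = ""
--
--     # Add each letter to the output
--     for index, item in enumerate(text):
--         output += item
--
--         # Add a space after every fifth letter
--         if (index + 1) % 5 == 0:
--             output += " "
--
--     # Return as all capitalized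
--     return output.upper()
-- ===== SOURCE B (Python) =====
-- from string import ascii_lowercase
--
-- def patristocrat(text: str) -> str:
--     """Returns the text formatted as a patristocrat"""
--     filtered = [c for c in text if c.lower() in ascii_lowercase]
--     parts = []
--     i = 0
--     while i < len(filtered):
--         chunk = filtered[i:i+5]
--         parts.append(''.join(chunk))
--         if len(chunk) == 5:
--             parts.append(' ')
--         i += 5
--     return ''.join(parts).upper()
-- ===== Notes on version B (the rewrite author's own statement) =====
-- stated objective: simpler
-- what changed: Replaced the per-character enumerate loop with its index%5 test by a chunking pass that repeatedly splits off the next five filtered letters and appends a space after each full chunk.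
import Mathlib
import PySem

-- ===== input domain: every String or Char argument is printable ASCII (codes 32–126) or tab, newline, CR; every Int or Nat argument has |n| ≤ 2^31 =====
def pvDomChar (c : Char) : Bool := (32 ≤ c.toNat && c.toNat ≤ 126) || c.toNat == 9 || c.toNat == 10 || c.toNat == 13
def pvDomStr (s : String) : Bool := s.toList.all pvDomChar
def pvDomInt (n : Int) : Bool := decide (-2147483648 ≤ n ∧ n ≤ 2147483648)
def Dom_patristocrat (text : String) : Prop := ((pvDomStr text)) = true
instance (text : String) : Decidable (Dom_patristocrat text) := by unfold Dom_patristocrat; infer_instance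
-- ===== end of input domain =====

-- B replaces A's per-character index%5 loop by a take-5/drop-5 chunking pass (simpler decomposition, same cost).

-- ===== PORT A =====
-- character.lower() in ascii_lowercase
def pvIsLetter (c : Char) : Bool :=
  PySem.Chars.isIn [PySem.Chars.lowerChar c] "abcdefghijklmnopqrstuvwxyz".toList

-- 'for index, item in enumerate(text): output += item; if (index+1)%5 == 0: output += " "'
def pvALoop (i : Nat) (l : List Char) : List Char :=
  match l with
  | [] => []
  | c :: rest => (c :: (if (i + 1) % 5 = 0 then [' '] else [])) ++ pvALoop (i + 1) rest

def patristocrat (text : String) : String :=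
  let formatted := text.toList.foldl (fun acc c => if pvIsLetter c then acc ++ [c] else acc) []
  String.mk (PySem.Chars.upper (pvALoop 0 formatted))

-- ===== PORT B =====
-- 'i = 0; while i < len(filtered): chunk = filtered[i:i+5]; …; i += 5'
def pvBLoop (l : List Char) (i : Nat) : List Char :=
  if i < l.length then
    let chunk := PySem.List.slice l (some (i : Int)) (some ((i : Int) + 5))
    (chunk ++ (if chunk.length = 5 then [' '] else [])) ++ pvBLoop l (i + 5)
  else []
termination_by l.length - i

def patristocrat_alt (text : String) : String :=
  let filtered := text.toList.filter pvIsLetter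
  String.mk (PySem.Chars.upper (pvBLoop filtered 0))

-- ===== PRECONDITION & SPEC =====
def Spec_patristocrat (text : String) (out : String) : Prop := out = patristocrat_alt text
instance (text : String) (out : String) : Decidable (Spec_patristocrat text out) := by unfold Spec_patristocrat; infer_instance

-- ===== CLAIM (what is proved, stated in full; the proofs are below) =====
def Claim_equal_patristocrat : Prop := ∀ (text : String), Dom_patristocrat text → Spec_patristocrat text (patristocrat text)

-- ===== LEMMAS AND PROOFS =====

-- A's loop only looks at the index modulo 5
theorem pvALoop_mod (l : List Char) : ∀ i j, i % 5 = j % 5 → pvALoop i l = pvALoop j l := by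
  induction l with
  | nil => intro i j _; rfl
  | cons c rest ih =>
    intro i j h
    simp only [pvALoop]
    have h1 : (i + 1) % 5 = (j + 1) % 5 := by omega
    rw [h1, ih (i + 1) (j + 1) h1]

-- unrolling A's loop over one chunk of (at most) five letters
theorem pvALoop_step (l : List Char) (hne : l ≠ []) :
    pvALoop 0 l = (l.take 5 ++ (if (l.take 5).length = 5 then [' '] else [])) ++ pvALoop 0 (l.drop 5) := by
  match l with
  | [] => exact absurd rfl hne
  | [a] => simp [pvALoop]
  | [a, b] => simp [pvALoop]
  | [a, b, c] => simp [pvALoop]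
  | [a, b, c, d] => simp [pvALoop]
  | a :: b :: c :: d :: e :: rest =>
    simp only [pvALoop, List.take, List.drop, List.length_cons]
    rw [pvALoop_mod rest 5 0 (by omega)]
    simp

-- B's index loop from position i computes A's loop on the remaining suffix
theorem pvBLoop_eq (l : List Char) (i : Nat) : pvBLoop l i = pvALoop 0 (l.drop i) := by
  rw [pvBLoop]
  by_cases h : i < l.length
  · rw [if_pos h]
    have hch : PySem.List.slice l (some (i : Int)) (some ((i : Int) + 5)) = (l.drop i).take 5 := by
      exact_mod_cast PySem.List.slice_natCast_add l i 5
    have hne : l.drop i ≠ [] := by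
      intro hz
      have := List.length_drop (l := l) (i := i)
      rw [hz] at this; simp at this; omega
    rw [pvALoop_step (l.drop i) hne, pvBLoop_eq l (i + 5)]
    simp only [hch, List.drop_drop]
  · rw [if_neg h, List.drop_eq_nil_of_le (by omega : l.length ≤ i)]
    simp [pvALoop]
termination_by l.length - i

-- ===== VERDICT (by name: the statement is the Claim_ definition above) =====
theorem patristocrat_spec : Claim_equal_patristocrat := by
  intro text _
  unfold Spec_patristocrat patristocrat patristocrat_alt
  simp only [PySem.List.foldl_append_if_eq_filter, List.nil_append, pvBLoop_eq, List.drop_zero]
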